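-- pv_equiv track=rewrite | github.com/jame9898/Netopo | Netopo-v1.0.0/dialogs/device_config_dialog.py | _get_n_shape_order
-- ===== SOURCE A (Python) =====
-- def _get_n_shape_order(count, rows=2):
--     order = []
--     cols = (count + rows - 1) // rows
--
--     for col in range(cols):
--         for row in range(rows - 1, -1, -1):
--             idx = col * rows + (rows - 1 - row)
--             if idx < count:
--                 order.append((idx, col, row))
--
--     return order
-- ===== SOURCE B (Python) =====
-- def _get_n_shape_order(count, rows=2):
--     if rows <= 0 or count <= 0:
--         return []
--     return [(idx, idx // rows, rows - 1 - (idx % rows)) for idx in range(count)]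
-- ===== Notes on version B (the rewrite author's own statement) =====
-- stated objective: simpler
-- what changed: Replaces A's nested column/row loops with a bound guard plus one flat pass over range(count), deriving col = idx // rows and row = rows - 1 - idx % rows arithmetically from the index.
import Mathlib
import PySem

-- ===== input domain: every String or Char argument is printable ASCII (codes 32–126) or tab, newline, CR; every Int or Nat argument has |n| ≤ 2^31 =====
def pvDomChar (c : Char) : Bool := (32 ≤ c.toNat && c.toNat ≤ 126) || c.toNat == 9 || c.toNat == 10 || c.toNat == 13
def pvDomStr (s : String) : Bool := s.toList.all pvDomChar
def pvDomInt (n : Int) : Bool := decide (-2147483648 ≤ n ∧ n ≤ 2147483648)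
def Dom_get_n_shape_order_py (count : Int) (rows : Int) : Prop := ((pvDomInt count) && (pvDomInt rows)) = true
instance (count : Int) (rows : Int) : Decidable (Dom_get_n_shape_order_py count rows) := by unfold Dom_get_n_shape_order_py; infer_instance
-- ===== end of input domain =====

-- B replaces A's nested column/row loops with a single flat pass deriving col and row
-- arithmetically from the index (objective: simpler).

-- ===== PORT A =====
def get_n_shape_order_py (count : Int) (rows : Int) : List (Int × Int × Int) :=
  -- cols = (count + rows - 1) // rows, inlined into the outer range; idx inlined likewise
  (PySem.List.pyRange 0 (PySem.Int.floordiv (count + rows - 1) rows) 1).foldl (fun order col =>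
    (PySem.List.pyRange (rows - 1) (-1) (-1)).foldl (fun order row =>
      if col * rows + (rows - 1 - row) < count then order ++ [(col * rows + (rows - 1 - row), col, row)] else order) order) []

-- ===== PORT B =====
def get_n_shape_order_py_alt (count : Int) (rows : Int) : List (Int × Int × Int) :=
  if rows ≤ 0 ∨ count ≤ 0 then []
  else (PySem.List.pyRange 0 count 1).map
    (fun idx => (idx, PySem.Int.floordiv idx rows, rows - 1 - PySem.Int.mod idx rows))

-- ===== PRECONDITION & SPEC =====
-- Pre_ excludes only rows = 0, where A raises ZeroDivisionError.
def Pre_get_n_shape_order_py (count : Int) (rows : Int) : Prop := rows ≠ 0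
instance (count : Int) (rows : Int) : Decidable (Pre_get_n_shape_order_py count rows) := by unfold Pre_get_n_shape_order_py; infer_instance
def pvWitness_get_n_shape_order_py : Int × Int := (5, 2)

def Spec_get_n_shape_order_py (count : Int) (rows : Int) (out : List (Int × Int × Int)) : Prop := out = get_n_shape_order_py_alt count rows
instance (count : Int) (rows : Int) (out : List (Int × Int × Int)) : Decidable (Spec_get_n_shape_order_py count rows out) := by unfold Spec_get_n_shape_order_py; infer_instance

-- ===== CLAIM (what is proved, stated in full; the proofs are below) =====
def Claim_equal_get_n_shape_order_py : Prop := ∀ (count : Int) (rows : Int), Dom_get_n_shape_order_py count rows → Pre_get_n_shape_order_py count rows → Spec_get_n_shape_order_py count rows (get_n_shape_order_py count rows)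

-- ===== LEMMAS AND PROOFS =====

-- B's per-index element.
def pvF (rows idx : Int) : Int × Int × Int :=
  (idx, PySem.Int.floordiv idx rows, rows - 1 - PySem.Int.mod idx rows)

-- One column of A's inner countdown loop, parametrised by how many rows remain.
theorem pv_inner (count rows col : Int) (hr : 0 < rows) (hc : 0 ≤ col) :
    ∀ (j : Nat), (j : Int) ≤ rows → ∀ acc : List (Int × Int × Int),
      (PySem.List.pyRange ((j : Int) - 1) (-1) (-1)).foldl (fun order row =>
          if col * rows + (rows - 1 - row) < count then order ++ [(col * rows + (rows - 1 - row), col, row)] else order) acc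
      = acc ++ (PySem.List.pyRange (col * rows + rows - j) (min count (col * rows + rows)) 1).map (pvF rows) := by
  intro j
  induction j with
  | zero =>
    intro _ acc
    rw [PySem.List.pyRange_neg_one_eq_nil (by norm_num),
        PySem.List.pyRange_one_eq_nil (by omega)]
    simp
  | succ j ih =>
    intro hj acc
    have hj' : ((j : Int)) ≤ rows := by push_cast at hj ⊢; omega
    rw [show ((j + 1 : Nat) : Int) - 1 = (j : Int) by push_cast; ring,
        PySem.List.pyRange_neg_one_cons (by omega)]
    simp only [List.foldl_cons]
    rw [show (j : Int) - 1 = ((j : Nat) : Int) - 1 from rfl, ih hj']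
    set idx := col * rows + (rows - 1 - (j : Int)) with hidx
    have hseg : col * rows + rows - ((j + 1 : Nat) : Int) = idx := by push_cast; omega
    have hnext : col * rows + rows - (j : Int) = idx + 1 := by omega
    rw [hseg, hnext]
    by_cases h : idx < count
    · have hmin : idx < min count (col * rows + rows) := by omega
      rw [if_pos h, PySem.List.pyRange_one_cons hmin]
      have hdiv : PySem.Int.floordiv idx rows = col := by
        rw [PySem.Int.floordiv_eq_iff_of_pos hr]
        constructor <;> nlinarith [hj', hidx]
      have hmod : PySem.Int.mod idx rows = rows - 1 - (j : Int) := by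
        have := PySem.Int.floordiv_mul_add_mod idx rows
        rw [hdiv] at this; omega
      simp [pvF, hdiv, hmod, List.append_assoc]
    · rw [if_neg h,
          PySem.List.pyRange_one_eq_nil (by omega : min count (col * rows + rows) ≤ idx + 1),
          PySem.List.pyRange_one_eq_nil (by omega : min count (col * rows + rows) ≤ idx)]

-- The whole inner loop of one column.
theorem pv_inner' (count rows col : Int) (hr : 0 < rows) (hc : 0 ≤ col)
    (acc : List (Int × Int × Int)) :
    (PySem.List.pyRange (rows - 1) (-1) (-1)).foldl (fun order row =>
        if col * rows + (rows - 1 - row) < count then order ++ [(col * rows + (rows - 1 - row), col, row)] else order) acc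
    = acc ++ (PySem.List.pyRange (col * rows) (min count (col * rows + rows)) 1).map (pvF rows) := by
  have h := pv_inner count rows col hr hc rows.toNat (by omega) acc
  rw [show ((rows.toNat : Int)) = rows by omega] at h
  rw [h, show col * rows + rows - rows = col * rows by ring]

-- The outer column loop, m columns in.
theorem pv_outer (count rows : Int) (hr : 0 < rows) (hcnt : 0 < count) :
    ∀ (m : Nat),
      (PySem.List.pyRange 0 (m : Int) 1).foldl (fun order col =>
        (PySem.List.pyRange (rows - 1) (-1) (-1)).foldl (fun order row =>
          if col * rows + (rows - 1 - row) < count then order ++ [(col * rows + (rows - 1 - row), col, row)] else order) order) []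
      = (PySem.List.pyRange 0 (min count ((m : Int) * rows)) 1).map (pvF rows) := by
  intro m
  induction m with
  | zero =>
    rw [PySem.List.pyRange_one_eq_nil (by norm_num),
        PySem.List.pyRange_one_eq_nil (by omega)]
    simp
  | succ m ih =>
    rw [show ((m + 1 : Nat) : Int) = (m : Int) + 1 by push_cast; ring,
        PySem.List.pyRange_one_succ_right (by positivity), List.foldl_append]
    simp only [List.foldl_cons, List.foldl_nil]
    rw [pv_inner' count rows (m : Int) hr (by positivity), ih]
    by_cases h : count ≤ (m : Int) * rows
    · have h2 : min count (((m : Int) + 1) * rows) = count :=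
        min_eq_left (by rw [show ((m : Int) + 1) * rows = (m : Int) * rows + rows by ring]; omega)
      rw [min_eq_left h, h2,
          PySem.List.pyRange_one_eq_nil (by omega : min count ((m : Int) * rows + rows) ≤ (m : Int) * rows)]
      simp
    · rw [min_eq_right (by omega : (m : Int) * rows ≤ count),
          show ((m : Int) + 1) * rows = (m : Int) * rows + rows by ring,
          ← List.map_append,
          ← PySem.List.pyRange_one_append 0 ((m : Int) * rows)
            (min count ((m : Int) * rows + rows)) (by positivity) (by omega)]

-- ===== VERDICT (by name: the statement is the Claim_ definition above) =====
theorem get_n_shape_order_py_spec : Claim_equal_get_n_shape_order_py := by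
  intro count rows _ hpre
  unfold Spec_get_n_shape_order_py get_n_shape_order_py get_n_shape_order_py_alt
  unfold Pre_get_n_shape_order_py at hpre
  rcases lt_trichotomy rows 0 with hr | hr | hr
  · -- rows < 0: A's inner range is empty, so A folds to []; B's guard fires.
    rw [if_pos (Or.inl (le_of_lt hr))]
    rw [PySem.List.pyRange_neg_one_eq_nil (by omega)]
    simp
  · exact absurd hr hpre
  · by_cases hc : count ≤ 0
    · -- cols ≤ 0, outer range empty; B's guard fires.
      rw [if_pos (Or.inr hc)]
      have hcols : PySem.Int.floordiv (count + rows - 1) rows < 1 :=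
        (PySem.Int.floordiv_lt_iff_lt_mul hr).mpr (by omega)
      rw [PySem.List.pyRange_one_eq_nil (by omega)]
      rfl
    · push_neg at hc
      rw [if_neg (by omega)]
      have hmod := PySem.Int.floordiv_mul_add_mod (count + rows - 1) rows
      have hmlt := PySem.Int.mod_lt (count + rows - 1) hr
      have hmnn := PySem.Int.mod_nonneg (count + rows - 1) hr
      have hge : count ≤ PySem.Int.floordiv (count + rows - 1) rows * rows := by omega
      have hnn : 0 ≤ PySem.Int.floordiv (count + rows - 1) rows :=
        (PySem.Int.le_floordiv_iff_mul_le hr).mpr (by omega)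
      have h1 : (((PySem.Int.floordiv (count + rows - 1) rows).toNat : Int))
          = PySem.Int.floordiv (count + rows - 1) rows := by omega
      have h := pv_outer count rows hr hc (PySem.Int.floordiv (count + rows - 1) rows).toNat
      rw [h1] at h
      rw [h, min_eq_left hge]
      rfl
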